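-- pv_equiv track=rewrite | github.com/moeheart/jx3bla | equip/AttributeCal.py | attribMerge
-- ===== SOURCE A (Python) =====
-- def attribMerge(attribA, attribB):
--     '''
--     将两个属性相加.
--     params:
--     - attribA, attribB: 需要相加的属性
--     returns:
--     - res: 相加后的属性
--     '''
--     res = {}
--     for line in attribA:
--         if "at" in line:
--             if line in res:
--                 res[line] += attribA[line]
--             else:
--                 res[line] = attribA[line]
--     for line in attribB:
--         if "at" in line:
--             if line in res:
--                 res[line] += attribB[line]
--             else:
--                 res[line] = attribB[line]
--     return res
-- ===== SOURCE B (Python) =====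
-- def attribMerge(attribA, attribB):
--     res = {}
--     for key in {**attribA, **attribB}:
--         if "at" in key:
--             if key in attribA and key in attribB:
--                 res[key] = attribA[key] + attribB[key]
--             elif key in attribA:
--                 res[key] = attribA[key]
--             else:
--                 res[key] = attribB[key]
--     return res
-- ===== Notes on version B (the rewrite author's own statement) =====
-- stated objective: alternative
-- what changed: Replaces A's two sequential accumulating passes (each conditionally inserting or summing into the result) with a single pass over the key union {**attribA, **attribB}, setting each 'at' key once by membership branching (sum when present in both dicts).
import Mathlib
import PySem

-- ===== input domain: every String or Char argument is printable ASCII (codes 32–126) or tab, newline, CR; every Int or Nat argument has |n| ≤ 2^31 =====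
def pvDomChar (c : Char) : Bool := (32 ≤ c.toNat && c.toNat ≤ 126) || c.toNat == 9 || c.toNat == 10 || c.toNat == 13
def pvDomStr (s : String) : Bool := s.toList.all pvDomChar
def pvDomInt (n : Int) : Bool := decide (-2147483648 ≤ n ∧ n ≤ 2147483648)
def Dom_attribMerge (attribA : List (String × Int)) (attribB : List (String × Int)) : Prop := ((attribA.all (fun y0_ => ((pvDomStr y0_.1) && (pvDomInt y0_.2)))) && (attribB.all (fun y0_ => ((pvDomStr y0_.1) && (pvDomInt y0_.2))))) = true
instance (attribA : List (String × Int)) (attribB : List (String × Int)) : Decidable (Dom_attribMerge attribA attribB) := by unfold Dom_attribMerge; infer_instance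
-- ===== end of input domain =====

-- B merges in ONE pass over the key union {**attribA, **attribB} with membership branching,
-- instead of A's two sequential accumulating passes; alternative decomposition, same cost.


-- B merges in ONE pass over the key union {**attribA, **attribB} with membership branching,
-- instead of A's two sequential accumulating passes; alternative decomposition, same cost.

-- ===== PORT A =====
-- 'res[line] += d[line]' is a lookup-then-overwrite: res.insert line (res.getD line 0 + d.getD line 0)
-- (the key is present in both dicts on that branch, so the 0 defaults are never used).
def attribMerge (attribA : List (String × Int)) (attribB : List (String × Int)) : List (String × Int) :=
  let dA := PySem.Dict.ofList attribA
  let dB := PySem.Dict.ofList attribB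
  let res : PySem.Dict String Int := PySem.Dict.empty
  let res := dA.keys.foldl (fun res line =>
    if PySem.Str.isIn "at" line then
      if res.contains line then
        res.insert line (res.getD line 0 + dA.getD line 0)
      else
        res.insert line (dA.getD line 0)
    else res) res
  let res := dB.keys.foldl (fun res line =>
    if PySem.Str.isIn "at" line then
      if res.contains line then
        res.insert line (res.getD line 0 + dB.getD line 0)
      else
        res.insert line (dB.getD line 0)
    else res) res
  res.items

-- ===== PORT B =====
def attribMerge_alt (attribA : List (String × Int)) (attribB : List (String × Int)) : List (String × Int) :=
  let dA := PySem.Dict.ofList attribA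
  let dB := PySem.Dict.ofList attribB
  -- {**attribA, **attribB}
  let union := dB.items.foldl (fun d kv => d.insert kv.1 kv.2) dA
  let res := union.keys.foldl (fun res key =>
    if PySem.Str.isIn "at" key then
      if dA.contains key && dB.contains key then
        res.insert key (dA.getD key 0 + dB.getD key 0)
      else if dA.contains key then
        res.insert key (dA.getD key 0)
      else
        res.insert key (dB.getD key 0)
    else res) PySem.Dict.empty
  res.items



-- ===== PRECONDITION & SPEC =====
def Spec_attribMerge (attribA : List (String × Int)) (attribB : List (String × Int)) (out : List (String × Int)) : Prop := out = attribMerge_alt attribA attribB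
instance (attribA : List (String × Int)) (attribB : List (String × Int)) (out : List (String × Int)) : Decidable (Spec_attribMerge attribA attribB out) := by unfold Spec_attribMerge; infer_instance

-- ===== CLAIM (what is proved, stated in full; the proofs are below) =====
def Claim_equal_attribMerge : Prop := ∀ (attribA : List (String × Int)) (attribB : List (String × Int)), Dom_attribMerge attribA attribB → Spec_attribMerge attribA attribB (attribMerge attribA attribB)

-- ===== LEMMAS AND PROOFS =====

theorem pvMergeLoop_items (d : PySem.Dict String Int) :
    ∀ (ks : List String) (res : PySem.Dict String Int), ks.Nodup → res.keys.Nodup →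
    (ks.foldl (fun res line =>
      if PySem.Str.isIn "at" line then
        if res.contains line then
          res.insert line (res.getD line 0 + d.getD line 0)
        else
          res.insert line (d.getD line 0)
      else res) res).items
    = res.items.map (fun kv => if kv.1 ∈ ks ∧ PySem.Str.isIn "at" kv.1 then (kv.1, kv.2 + d.getD kv.1 0) else kv)
      ++ (ks.filter (fun k => PySem.Str.isIn "at" k && !res.contains k)).map (fun k => (k, d.getD k 0)) := by
  intro ks
  induction ks with
  | nil => intro res _ _; simp
  | cons k rest ih =>
    intro res hnd hkeys
    simp only [List.nodup_cons] at hnd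
    obtain ⟨hknr, hrest⟩ := hnd
    simp only [List.foldl_cons, List.filter_cons]
    by_cases hp : PySem.Str.isIn "at" k
    · have hpc : PySem.Chars.isIn ['a', 't'] k.toList = true := by simpa using hp
      rw [if_pos hp]
      by_cases hc : res.contains k
      · -- existing key: overwrite in place
        rw [if_pos hc, ih _ hrest (PySem.Dict.nodup_keys_insert _ _ _ hkeys),
            PySem.Dict.items_insert_of_contains _ _ hc,
            if_neg (show ¬ (PySem.Str.isIn "at" k && !res.contains k) = true by simp [hc]),
            List.map_map]
        congr 1
        · apply List.map_congr_left
          rintro ⟨k1, v1⟩ hkv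
          by_cases hk : k1 = k
          · subst hk
            have hv : res.getD k1 0 = v1 := by
              rw [PySem.Dict.getD_eq_get?_getD, PySem.Dict.get?_of_mem_items _ hkv hkeys]
              rfl
            simp [hv, hpc, hknr]
          · have hbk : (k1 == k) = false := by simpa using hk
            by_cases hm : k1 ∈ rest <;> simp [hm, hk]
        · refine congrArg _ (List.filter_congr ?_)
          intro k' hk'
          have hne : (k' == k) = false := by
            simp only [beq_eq_false_iff_ne, ne_eq]
            exact fun h => hknr (h ▸ hk')
          simp [PySem.Dict.contains_insert, hne]
      · -- fresh key: append
        have hcb : res.contains k = false := by simpa using hc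
        rw [if_neg hc, ih _ hrest (PySem.Dict.nodup_keys_insert _ _ _ hkeys),
            PySem.Dict.items_insert_of_not_contains _ _ hcb,
            if_pos (show (PySem.Str.isIn "at" k && !res.contains k) = true by simp [hpc, hcb]),
            List.map_append]
        have hknotmem : ∀ kv ∈ res.items, kv.1 ≠ k := by
          intro kv hkv h
          exact hc ((PySem.Dict.contains_iff_mem_keys _ _).2
            (h ▸ PySem.Dict.mem_keys_of_mem_items _ hkv))
        have hmap : res.items.map (fun kv => if kv.1 ∈ rest ∧ PySem.Str.isIn "at" kv.1 then (kv.1, kv.2 + d.getD kv.1 0) else kv)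
            = res.items.map (fun kv => if kv.1 ∈ k :: rest ∧ PySem.Str.isIn "at" kv.1 then (kv.1, kv.2 + d.getD kv.1 0) else kv) := by
          apply List.map_congr_left
          intro kv hkv
          simp [List.mem_cons, hknotmem kv hkv]
        have hfil : List.filter (fun k' => PySem.Str.isIn "at" k' && !(res.insert k (d.getD k 0)).contains k') rest
            = List.filter (fun k' => PySem.Str.isIn "at" k' && !res.contains k') rest := by
          apply List.filter_congr
          intro k' hk'
          have hne : (k' == k) = false := by
            simp only [beq_eq_false_iff_ne, ne_eq]
            exact fun h => hknr (h ▸ hk')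
          simp [PySem.Dict.contains_insert, hne]
        rw [hfil, hmap]
        have hsingle : List.map (fun kv => if kv.1 ∈ rest ∧ PySem.Str.isIn "at" kv.1 then (kv.1, kv.2 + d.getD kv.1 0) else kv) [(k, d.getD k 0)]
            = [(k, d.getD k 0)] := by
          simp [hknr]
        rw [hsingle]
        simp
    · have hpf : PySem.Chars.isIn ['a', 't'] k.toList = false := by simpa using hp
      rw [if_neg hp, ih _ hrest hkeys,
          if_neg (show ¬ (PySem.Str.isIn "at" k && !res.contains k) = true by simp [hpf])]
      congr 1
      apply List.map_congr_left
      intro kv hkv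
      by_cases hk : kv.1 = k
      · simp [hk, hpf]
      · by_cases hm : kv.1 ∈ rest <;> simp [hm, hk]
theorem pvBuildLoop_items (dA dB : PySem.Dict String Int) :
    ∀ (ks : List String) (res : PySem.Dict String Int), ks.Nodup →
    (∀ k ∈ ks, res.contains k = false) →
    (ks.foldl (fun res key =>
      if PySem.Str.isIn "at" key then
        if dA.contains key && dB.contains key then
          res.insert key (dA.getD key 0 + dB.getD key 0)
        else if dA.contains key then
          res.insert key (dA.getD key 0)
        else
          res.insert key (dB.getD key 0)
      else res) res).items
    = res.items
      ++ (ks.filter (fun k => PySem.Str.isIn "at" k)).map (fun k =>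
           (k, if dA.contains k then
                 (if dB.contains k then dA.getD k 0 + dB.getD k 0 else dA.getD k 0)
               else dB.getD k 0)) := by
  intro ks
  induction ks with
  | nil => intro res _ _; simp
  | cons k rest ih =>
    intro res hnd hfr
    simp only [List.nodup_cons] at hnd
    obtain ⟨hknr, hrest⟩ := hnd
    have hfrk : res.contains k = false := hfr k (by simp)
    simp only [List.foldl_cons, List.filter_cons]
    by_cases hp : PySem.Str.isIn "at" k
    · have hbranch : (if (dA.contains k && dB.contains k) = true then res.insert k (dA.getD k 0 + dB.getD k 0)
          else if dA.contains k = true then res.insert k (dA.getD k 0) else res.insert k (dB.getD k 0))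
        = res.insert k (if dA.contains k = true then (if dB.contains k = true then dA.getD k 0 + dB.getD k 0 else dA.getD k 0) else dB.getD k 0) := by
        by_cases hA : dA.contains k <;> by_cases hB : dB.contains k <;> simp [hA, hB]
      have hfr' : ∀ v : Int, ∀ k' ∈ rest, (res.insert k v).contains k' = false := by
        intro v k' hk'
        have hne : (k' == k) = false := by
          simp only [beq_eq_false_iff_ne, ne_eq]
          exact fun h => hknr (h ▸ hk')
        simp [PySem.Dict.contains_insert, hne, hfr k' (by simp [hk'])]
      rw [if_pos hp, hbranch, ih _ hrest (hfr' _),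
          PySem.Dict.items_insert_of_not_contains _ _ hfrk]
      have hp2 : PySem.Chars.isIn ['a', 't'] k.toList = true := by simpa using hp
      simp [hp2]
    · rw [if_neg hp, ih _ hrest (fun k' hk' => hfr k' (by simp [hk']))]
      have hp2 : ¬ PySem.Chars.isIn ['a', 't'] k.toList = true := by simpa using hp
      simp [hp2]
theorem pvUnionKeys :
    ∀ (l : List (String × Int)) (d : PySem.Dict String Int), (l.map Prod.fst).Nodup →
    (l.foldl (fun d kv => d.insert kv.1 kv.2) d).keys
    = d.keys ++ (l.map Prod.fst).filter (fun k => !d.contains k) := by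
  intro l
  induction l with
  | nil => intro d _; simp
  | cons kv rest ih =>
    intro d hnd
    simp only [List.map_cons, List.nodup_cons] at hnd
    obtain ⟨hk, hrest⟩ := hnd
    simp only [List.foldl_cons, List.map_cons, List.filter_cons]
    rw [ih _ hrest]
    have hfil : List.filter (fun k => !(d.insert kv.1 kv.2).contains k) (rest.map Prod.fst)
        = List.filter (fun k => !d.contains k) (rest.map Prod.fst) := by
      apply List.filter_congr; intro k hkmem
      have hne : (k == kv.1) = false := by
        simp only [beq_eq_false_iff_ne, ne_eq]
        exact fun h => hk (h ▸ hkmem)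
      simp [PySem.Dict.contains_insert, hne]
    rw [hfil]
    by_cases hc : d.contains kv.1
    · rw [PySem.Dict.keys_insert_of_contains _ _ hc]; simp [hc]
    · rw [PySem.Dict.keys_insert_of_not_contains _ _ (by simpa using hc)]
      simp [hc]

theorem pvFirstPass (a : PySem.Dict String Int) (hak : a.keys.Nodup) :
    (a.keys.foldl (fun res line =>
      if PySem.Str.isIn "at" line then
        if res.contains line then
          res.insert line (res.getD line 0 + a.getD line 0)
        else
          res.insert line (a.getD line 0)
      else res) PySem.Dict.empty).items
    = (a.keys.filter (fun k => PySem.Str.isIn "at" k)).map (fun k => (k, a.getD k 0)) := by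
  rw [pvMergeLoop_items a a.keys PySem.Dict.empty hak (by simp),
      show (PySem.Dict.empty : PySem.Dict String Int).items = [] from rfl]
  simp [PySem.Dict.contains_empty]

theorem pvSecondPass (a b : PySem.Dict String Int) (hak : a.keys.Nodup) (hbk : b.keys.Nodup)
    (r1 : PySem.Dict String Int)
    (h1 : r1.items = (a.keys.filter (fun k => PySem.Str.isIn "at" k)).map (fun k => (k, a.getD k 0))) :
    (b.keys.foldl (fun res line =>
      if PySem.Str.isIn "at" line then
        if res.contains line then
          res.insert line (res.getD line 0 + b.getD line 0)
        else
          res.insert line (b.getD line 0)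
      else res) r1).items
    = (a.keys.filter (fun k => PySem.Str.isIn "at" k)).map (fun k => (k, a.getD k 0 + b.getD k 0))
      ++ (b.keys.filter (fun k => PySem.Str.isIn "at" k && !a.contains k)).map (fun k => (k, b.getD k 0)) := by
  have hkeys1 : r1.keys = a.keys.filter (fun k => PySem.Str.isIn "at" k) := by
    show r1.items.map (·.1) = _
    rw [h1]; simp [Function.comp_def]
  have hnod1 : r1.keys.Nodup := by rw [hkeys1]; exact hak.filter _
  rw [pvMergeLoop_items b b.keys r1 hbk hnod1, h1, List.map_map]
  congr 1
  · apply List.map_congr_left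
    intro k hk
    have hpk : PySem.Str.isIn "at" k = true := by
      have := (List.mem_filter.1 hk).2; simpa using this
    have hpc : PySem.Chars.isIn ['a', 't'] k.toList = true := by simpa using hpk
    by_cases hkb : b.contains k
    · have hm : k ∈ b.keys := (PySem.Dict.contains_iff_mem_keys _ _).1 hkb
      simp [Function.comp, hm, hpc]
    · have hnb : k ∉ b.keys := fun hm => hkb ((PySem.Dict.contains_iff_mem_keys _ _).2 hm)
      have h0 : b.getD k 0 = 0 := PySem.Dict.getD_of_not_contains _ _ (by simpa using hkb)
      simp [Function.comp, hnb, h0]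
  · refine congrArg _ (List.filter_congr ?_)
    intro k hk
    by_cases hpk : PySem.Str.isIn "at" k
    · have hc1 : r1.contains k = a.contains k := by
        rw [PySem.Dict.contains_eq_decide_mem_keys, hkeys1,
            PySem.Dict.contains_eq_decide_mem_keys]
        have hpc : PySem.Chars.isIn ['a', 't'] k.toList = true := by simpa using hpk
        simp [List.mem_filter, hpc]
      rw [hc1]
    · have hpf : PySem.Chars.isIn ['a', 't'] k.toList = false := by simpa using hpk
      simp [hpf]

theorem pvAltPass (a b : PySem.Dict String Int) (hak : a.keys.Nodup) (hbk : b.keys.Nodup) :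
    (((b.items.foldl (fun d kv => d.insert kv.1 kv.2) a)).keys.foldl (fun res key =>
      if PySem.Str.isIn "at" key then
        if a.contains key && b.contains key then
          res.insert key (a.getD key 0 + b.getD key 0)
        else if a.contains key then
          res.insert key (a.getD key 0)
        else
          res.insert key (b.getD key 0)
      else res) PySem.Dict.empty).items
    = (a.keys.filter (fun k => PySem.Str.isIn "at" k)).map (fun k => (k, a.getD k 0 + b.getD k 0))
      ++ (b.keys.filter (fun k => PySem.Str.isIn "at" k && !a.contains k)).map (fun k => (k, b.getD k 0)) := by
  have hbkeys : (b.items.map Prod.fst).Nodup := hbk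
  have hu : (b.items.foldl (fun d kv => d.insert kv.1 kv.2) a).keys
      = a.keys ++ (b.items.map Prod.fst).filter (fun k => !a.contains k) :=
    pvUnionKeys b.items a hbkeys
  have hudis : ∀ k ∈ (b.items.map Prod.fst).filter (fun k => !a.contains k), k ∉ a.keys := by
    intro k hk hmem
    have := (List.mem_filter.1 hk).2
    simp [(PySem.Dict.contains_iff_mem_keys a k).2 hmem] at this
  have hun : (b.items.foldl (fun d kv => d.insert kv.1 kv.2) a).keys.Nodup := by
    rw [hu]
    exact List.Nodup.append hak (hbkeys.filter _) (fun k hka hkb => hudis k hkb hka)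
  rw [pvBuildLoop_items a b _ PySem.Dict.empty hun (fun k _ => PySem.Dict.contains_empty k),
      show (PySem.Dict.empty : PySem.Dict String Int).items = [] from rfl,
      List.nil_append, hu, List.filter_append, List.map_append]
  congr 1
  · apply List.map_congr_left
    intro k hk
    have hka : k ∈ a.keys := (List.mem_filter.1 hk).1
    have hca : a.contains k = true := (PySem.Dict.contains_iff_mem_keys _ _).2 hka
    by_cases hcb : b.contains k
    · simp [hca, hcb]
    · have h0 : b.getD k 0 = 0 := PySem.Dict.getD_of_not_contains _ _ (by simpa using hcb)
      simp [hca, hcb, h0]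
  · rw [List.filter_filter]
    have hsame : (b.items.map Prod.fst) = b.keys := rfl
    rw [hsame]
    apply List.map_congr_left
    intro k hk
    have hca : a.contains k = false := by
      have := (List.mem_filter.1 hk).2
      simp at this
      exact this.2
    simp [hca]

theorem pvPorts_eq (A B : List (String × Int)) : attribMerge A B = attribMerge_alt A B := by
  simp only [attribMerge, attribMerge_alt]
  rw [pvSecondPass (PySem.Dict.ofList A) (PySem.Dict.ofList B)
        (PySem.Dict.nodup_keys_ofList A) (PySem.Dict.nodup_keys_ofList B) _
        (pvFirstPass (PySem.Dict.ofList A) (PySem.Dict.nodup_keys_ofList A)),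
      pvAltPass (PySem.Dict.ofList A) (PySem.Dict.ofList B)
        (PySem.Dict.nodup_keys_ofList A) (PySem.Dict.nodup_keys_ofList B)]

-- ===== VERDICT (by name: the statement is the Claim_ definition above) =====
theorem attribMerge_spec : Claim_equal_attribMerge := by
  intro attribA attribB _
  unfold Spec_attribMerge
  exact pvPorts_eq attribA attribB
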